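-- pv_equiv track=rewrite | github.com/yuanjiming051-ctrl/vrp | vrptw0923 - 副本/worst_route_optimizer.py | _find_route_positions_in_chromosome
-- ===== SOURCE A (Python) =====
-- from typing import List, Dict, Tuple, Optional
--
-- def _find_route_positions_in_chromosome(chromosome: List[int], route: List[int]) -> List[int]:
--     """找到路径中客户在染色体中的位置"""
--     positions = []
--     route_set = set(route)
--
--     for i, customer in enumerate(chromosome):
--         if customer in route_set:
--             positions.append(i)
--             route_set.remove(customer)
--             if not route_set:
--                 break
--
--     return positions
-- ===== SOURCE B (Python) =====
-- def _find_route_positions_in_chromosome(chromosome, route):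
--     """Index-then-sort: map each customer to its first index, then sort the hits."""
--     first_index = {}
--     for i, customer in enumerate(chromosome):
--         if customer not in first_index:
--             first_index[customer] = i
--     return sorted(first_index[c] for c in set(route) if c in first_index)
-- ===== Notes on version B (the rewrite author's own statement) =====
-- stated objective: alternative
-- what changed: Replaces the gated scan that consumes a shrinking set of route customers (with early break) by a first-occurrence index dict built in one pass over the chromosome, then collecting the indices of deduped route customers and sorting them.
import Mathlib
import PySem

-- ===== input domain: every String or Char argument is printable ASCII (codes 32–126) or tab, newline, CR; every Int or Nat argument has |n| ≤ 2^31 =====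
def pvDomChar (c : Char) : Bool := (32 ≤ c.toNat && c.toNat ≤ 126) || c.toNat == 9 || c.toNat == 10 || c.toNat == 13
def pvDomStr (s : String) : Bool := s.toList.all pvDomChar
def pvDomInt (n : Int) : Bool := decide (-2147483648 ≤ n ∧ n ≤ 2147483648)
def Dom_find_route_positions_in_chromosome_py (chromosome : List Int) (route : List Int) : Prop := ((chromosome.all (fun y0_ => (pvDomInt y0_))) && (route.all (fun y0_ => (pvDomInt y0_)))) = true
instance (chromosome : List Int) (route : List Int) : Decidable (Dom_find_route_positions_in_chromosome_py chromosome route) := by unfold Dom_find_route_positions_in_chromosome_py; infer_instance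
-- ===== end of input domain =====

-- B replaces A's consume-a-set scan by a first-index dict plus sort (alternative decomposition, same results).

-- ===== PORT A =====
-- A's loop: scan chromosome with a running index and the shrinking route set, breaking when the set empties.
def pvGoA : List Int → Int → PySem.Set Int → List Int
  | [], _, _ => []
  | c :: rest, i, s =>
    if PySem.Set.contains s c then
      -- Python 'route_set.remove(customer)': membership was checked just above, so remove = discard (exact here)
      if (PySem.Set.discard s c).isEmpty then [i]
      else i :: pvGoA rest (i + 1) (PySem.Set.discard s c)
    else pvGoA rest (i + 1) s

def find_route_positions_in_chromosome_py (chromosome : List Int) (route : List Int) : List Int :=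
  pvGoA chromosome 0 (PySem.Set.ofList route)

-- ===== PORT B =====
-- B's first pass: first_index[c] = first position of c in the chromosome.
def pvBuildIdx : List Int → Int → PySem.Dict Int Int → PySem.Dict Int Int
  | [], _, d => d
  | c :: rest, i, d => pvBuildIdx rest (i + 1) (if d.contains c then d else d.insert c i)

def find_route_positions_in_chromosome_py_alt (chromosome : List Int) (route : List Int) : List Int :=
  PySem.List.sorted
    ((PySem.Set.ofList route).filterMap (fun c => (pvBuildIdx chromosome 0 PySem.Dict.empty).get? c))
    (fun x => x)

-- ===== PRECONDITION & SPEC =====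
def Spec_find_route_positions_in_chromosome_py (chromosome : List Int) (route : List Int) (out : List Int) : Prop := out = find_route_positions_in_chromosome_py_alt chromosome route
instance (chromosome : List Int) (route : List Int) (out : List Int) : Decidable (Spec_find_route_positions_in_chromosome_py chromosome route out) := by unfold Spec_find_route_positions_in_chromosome_py; infer_instance

-- ===== CLAIM (what is proved, stated in full; the proofs are below) =====
def Claim_equal_find_route_positions_in_chromosome_py : Prop := ∀ (chromosome : List Int) (route : List Int), Dom_find_route_positions_in_chromosome_py chromosome route → Spec_find_route_positions_in_chromosome_py chromosome route (find_route_positions_in_chromosome_py chromosome route)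

-- ===== LEMMAS AND PROOFS =====

-- The dict built by "insert if absent" looks up to the first index (offset by i).
theorem pvBuildIdx_get? (cs : List Int) : ∀ (i : Int) (d : PySem.Dict Int Int) (c : Int),
    (pvBuildIdx cs i d).get? c
      = (d.get? c).or (Option.map (fun (j : Nat) => i + (j : Int)) (PySem.List.index? cs c)) := by
  induction cs with
  | nil =>
    intro i d c
    simp [pvBuildIdx, PySem.List.index?_eq_idxOf?]
  | cons x xs ih =>
    intro i d c
    by_cases hxc : x = c
    · subst hxc
      rw [pvBuildIdx, ih, PySem.List.index?_cons_self]
      by_cases hcont : d.contains x = true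
      · have : ∃ v, d.get? x = some v := by
          rcases h : d.get? x with _ | v
          · rw [PySem.Dict.get?_eq_none_iff_contains] at h; simp [h] at hcont
          · exact ⟨v, rfl⟩
        rcases this with ⟨v, hv⟩
        simp [hcont, hv]
      · have hnone : d.get? x = none := by
          rw [PySem.Dict.get?_eq_none_iff_contains]; simpa using hcont
        simp [hcont, hnone, PySem.Dict.get?_insert_self]
    · rw [pvBuildIdx, ih, PySem.List.index?_cons_of_ne _ hxc]
      have hget : (if d.contains x then d else d.insert x i).get? c = d.get? c := by
        split
        · rfl
        · exact PySem.Dict.get?_insert_of_ne d i (Ne.symm hxc)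
      rw [hget]
      cases h : PySem.List.index? xs c with
      | none => simp
      | some j =>
        congr 1
        simp
        ring


-- A's loop on an empty route set returns [].
theorem pvGoA_nil_set (cs : List Int) : ∀ (i : Int), pvGoA cs i [] = [] := by
  induction cs with
  | nil => intro i; rfl
  | cons x xs ih => intro i; simp [pvGoA, PySem.Set.contains, ih]

-- A nodup list with x in it is a permutation of x :: (its discard of x).
theorem perm_cons_discard {s : List Int} {x : Int} (hnd : s.Nodup) (hx : x ∈ s) :
    s.Perm (x :: PySem.Set.discard s x) := by
  induction s with
  | nil => cases hx
  | cons a t ih =>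
    rcases List.nodup_cons.mp hnd with ⟨hat, hndt⟩
    by_cases hax : a = x
    · subst hax
      have hdt : PySem.Set.discard (a :: t) a = t := by
        simp only [PySem.Set.discard, List.filter_cons, beq_self_eq_true, Bool.not_true]
        refine List.filter_eq_self.mpr (fun y hy => ?_)
        have hya : y ≠ a := fun h => hat (h ▸ hy)
        simp [hya]
      rw [hdt]
    · have hxt : x ∈ t := by
        cases hx with
        | head => exact absurd rfl hax
        | tail _ h => exact h
      have hdisc : PySem.Set.discard (a :: t) x = a :: PySem.Set.discard t x := by
        simp only [PySem.Set.discard, List.filter_cons]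
        have hax' : (!(a == x)) = true := by simpa using hax
        rw [hax']
        simp
      rw [hdisc]
      exact ((ih hndt hxt).cons a).trans (List.Perm.swap x a _)

-- A's loop output is a permutation of the first indices of the set's members.
theorem pvGoA_perm (cs : List Int) : ∀ (i : Int) (s : PySem.Set Int), s.Nodup →
    (pvGoA cs i s).Perm
      (s.filterMap (fun c => Option.map (fun (j : Nat) => i + (j : Int)) (PySem.List.index? cs c))) := by
  induction cs with
  | nil =>
    intro i s _
    simp [pvGoA, PySem.List.index?_eq_idxOf?]
  | cons x xs ih =>
    intro i s hnd
    by_cases hx : x ∈ s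
    · have hcont : PySem.Set.contains s x = true := (PySem.Set.contains_iff s x).mpr hx
      have hstep : pvGoA (x :: xs) i s = i :: pvGoA xs (i + 1) (PySem.Set.discard s x) := by
        rw [pvGoA]
        simp only [hcont, if_true]
        by_cases he : (PySem.Set.discard s x).isEmpty
        · have hnil : PySem.Set.discard s x = [] := List.isEmpty_iff.mp he
          rw [he]
          simp only [if_true]
          rw [hnil, pvGoA_nil_set]
        · simp [he]
      rw [hstep]
      have hperm := (perm_cons_discard hnd hx).filterMap
        (fun c => Option.map (fun (j : Nat) => i + (j : Int)) (PySem.List.index? (x :: xs) c))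
      refine List.Perm.trans ?_ hperm.symm
      have hcongr : List.filterMap
          (fun c => Option.map (fun (j : Nat) => i + (j : Int)) (PySem.List.index? (x :: xs) c))
          (PySem.Set.discard s x)
          = List.filterMap
          (fun c => Option.map (fun (j : Nat) => i + 1 + (j : Int)) (PySem.List.index? xs c))
          (PySem.Set.discard s x) := by
        apply List.filterMap_congr
        intro c hc
        have hcx : c ≠ x := ((PySem.Set.mem_discard s x c).mp hc).2
        rw [PySem.List.index?_cons_of_ne _ (Ne.symm hcx)]
        cases h : PySem.List.index? xs c with
        | none => simp
        | some j =>
          simp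
          ring
      rw [List.filterMap_cons, PySem.List.index?_cons_self, hcongr]
      simp only [Option.map_some, Nat.cast_zero, add_zero]
      exact (ih (i + 1) (PySem.Set.discard s x) (PySem.Set.nodup_discard s x hnd)).cons i
    · have hcont : PySem.Set.contains s x = false := by
        rcases h : PySem.Set.contains s x with _ | _
        · rfl
        · exact absurd ((PySem.Set.contains_iff s x).mp h) hx
      rw [pvGoA]
      simp only [hcont, Bool.false_eq_true, if_false]
      have hcongr : List.filterMap
          (fun c => Option.map (fun (j : Nat) => i + (j : Int)) (PySem.List.index? (x :: xs) c)) s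
          = List.filterMap
          (fun c => Option.map (fun (j : Nat) => i + 1 + (j : Int)) (PySem.List.index? xs c)) s := by
        apply List.filterMap_congr
        intro c hc
        have hcx : c ≠ x := fun h => hx (h ▸ hc)
        rw [PySem.List.index?_cons_of_ne _ (Ne.symm hcx)]
        cases h : PySem.List.index? xs c with
        | none => simp
        | some j =>
          simp
          ring
      rw [hcongr]
      exact ih (i + 1) s hnd

-- Every emitted position is at least the running index.
theorem pvGoA_lb (cs : List Int) : ∀ (i : Int) (s : PySem.Set Int) (p : Int),
    p ∈ pvGoA cs i s → i ≤ p := by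
  induction cs with
  | nil => intro i s p hp; simp [pvGoA] at hp
  | cons x xs ih =>
    intro i s p hp
    rw [pvGoA] at hp
    split at hp
    · split at hp
      · simp at hp; omega
      · rcases List.mem_cons.mp hp with h | h
        · omega
        · have := ih (i + 1) _ p h; omega
    · have := ih (i + 1) s p hp; omega

-- A's output is strictly increasing.
theorem pvGoA_pairwise (cs : List Int) : ∀ (i : Int) (s : PySem.Set Int),
    (pvGoA cs i s).Pairwise (· < ·) := by
  induction cs with
  | nil => intro i s; simp [pvGoA]
  | cons x xs ih =>
    intro i s
    rw [pvGoA]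
    split
    · split
      · simp
      · refine List.pairwise_cons.mpr ⟨?_, ih (i + 1) _⟩
        intro p hp
        have := pvGoA_lb xs (i + 1) _ p hp
        omega
    · exact ih (i + 1) s

-- ===== VERDICT (by name: the statement is the Claim_ definition above) =====
theorem find_route_positions_in_chromosome_py_spec : Claim_equal_find_route_positions_in_chromosome_py := by
  intro chromosome route _
  unfold Spec_find_route_positions_in_chromosome_py
  unfold find_route_positions_in_chromosome_py find_route_positions_in_chromosome_py_alt
  have hfun : (fun c => (pvBuildIdx chromosome 0 PySem.Dict.empty).get? c)
      = fun c => Option.map (fun (j : Nat) => (0 : Int) + (j : Int)) (PySem.List.index? chromosome c) := by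
    funext c
    rw [pvBuildIdx_get?, PySem.Dict.get?_empty, Option.none_or]
  rw [hfun]
  exact (PySem.List.sorted_eq_of_perm_of_pairwise_lt _ _ _
    (pvGoA_perm chromosome 0 (PySem.Set.ofList route) (PySem.Set.nodup_ofList route))
    (pvGoA_pairwise chromosome 0 (PySem.Set.ofList route))).symm
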